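-- pv_equiv track=rewrite | github.com/egor7orlov/static_code_analyzer | Static Code Analyzer/task/analyzer/code_analyzer.py | has_more_than_two_blank_lines
-- ===== SOURCE A (Python) =====
-- def has_more_than_two_blank_lines(lines):
--     issue_lines = []
--     blank_line_count = 0
--     for i, line in enumerate(lines):
--         if line.strip() == '':
--             blank_line_count += 1
--         else:
--             if blank_line_count > 2:
--                 issue_lines.append(i - blank_line_count + blank_line_count + 1)
--             blank_line_count = 0
--     return issue_lines
-- ===== SOURCE B (Python) =====
-- def has_more_than_two_blank_lines(lines):
--     return [i + 1
--             for i, line in enumerate(lines)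
--             if line.strip() != '' and i >= 3
--             and all(lines[i - k].strip() == '' for k in (1, 2, 3))]
-- ===== Notes on version B (the rewrite author's own statement) =====
-- stated objective: alternative
-- what changed: Replaces the cross-iteration blank-line counter and accumulator loop with a stateless list comprehension that selects each non-blank line whose three immediate predecessors are all blank, using a fixed three-element window lookup.
import Mathlib
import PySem

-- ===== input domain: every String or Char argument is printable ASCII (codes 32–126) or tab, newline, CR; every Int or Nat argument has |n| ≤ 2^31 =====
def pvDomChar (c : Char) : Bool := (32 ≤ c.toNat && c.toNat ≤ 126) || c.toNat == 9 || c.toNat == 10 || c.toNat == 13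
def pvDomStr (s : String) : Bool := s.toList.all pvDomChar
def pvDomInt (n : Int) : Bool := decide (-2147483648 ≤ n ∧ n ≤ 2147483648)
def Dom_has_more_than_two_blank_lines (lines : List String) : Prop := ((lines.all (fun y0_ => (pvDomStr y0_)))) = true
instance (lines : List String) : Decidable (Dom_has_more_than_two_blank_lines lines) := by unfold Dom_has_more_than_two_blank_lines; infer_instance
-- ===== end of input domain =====

-- B replaces A's running blank-line counter with a stateless three-line-window comprehension (alternative decomposition, same cost).

-- ===== PORT A =====
-- literal port of A's loop: fold over enumerate(lines) carrying (issue_lines, blank_line_count)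
def has_more_than_two_blank_lines (lines : List String) : List Int :=
  ((PySem.List.enumerate lines).foldl
    (fun (st : List Int × Int) (p : Int × String) =>
      if PySem.Str.strip p.2 = "" then (st.1, st.2 + 1)
      else (if st.2 > 2 then st.1 ++ [p.1 - st.2 + st.2 + 1] else st.1, 0))
    ([], 0)).1

-- ===== PORT B =====
-- literal port of Source B's comprehension; the i ≥ 3 guard makes every lines[i-k] index in range,
-- so `(pyGet? …).getD ""` is exact there (pyGet? never returns none under the guard).
def has_more_than_two_blank_lines_alt (lines : List String) : List Int :=
  (PySem.List.enumerate lines).filterMap (fun (p : Int × String) =>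
    if (PySem.Str.strip p.2 != "") && (3 ≤ p.1) &&
       ([(1:Int), 2, 3].all (fun k =>
          PySem.Str.strip ((PySem.List.pyGet? lines (p.1 - k)).getD "") == ""))
    then some (p.1 + 1) else none)

-- ===== PRECONDITION & SPEC =====
def Spec_has_more_than_two_blank_lines (lines : List String) (out : List Int) : Prop := out = has_more_than_two_blank_lines_alt lines
instance (lines : List String) (out : List Int) : Decidable (Spec_has_more_than_two_blank_lines lines out) := by unfold Spec_has_more_than_two_blank_lines; infer_instance

-- ===== CLAIM (what is proved, stated in full; the proofs are below) =====
def Claim_equal_has_more_than_two_blank_lines : Prop := ∀ (lines : List String), Dom_has_more_than_two_blank_lines lines → Spec_has_more_than_two_blank_lines lines (has_more_than_two_blank_lines lines)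

-- ===== LEMMAS AND PROOFS =====

-- the filter condition of B's port, abstracted
def pvCond (lines : List String) (p : Int × String) : Bool :=
  (PySem.Str.strip p.2 != "") && (3 ≤ p.1) &&
  ([(1:Int), 2, 3].all (fun k =>
      PySem.Str.strip ((PySem.List.pyGet? lines (p.1 - k)).getD "") == ""))

-- A's loop body, abstracted
def pvStep (st : List Int × Int) (p : Int × String) : List Int × Int :=
  if PySem.Str.strip p.2 = "" then (st.1, st.2 + 1)
  else (if st.2 > 2 then st.1 ++ [p.1 - st.2 + st.2 + 1] else st.1, 0)

lemma foldl_pvStep_acc (ps : List (Int × String)) :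
    ∀ (acc : List Int) (c : Int),
      (ps.foldl pvStep (acc, c)).1 = acc ++ (ps.foldl pvStep ([], c)).1 := by
  induction ps with
  | nil => intro acc c; simp
  | cons p ps ih =>
    intro acc c
    simp only [List.foldl_cons, pvStep]
    split
    · exact ih acc (c + 1)
    · split
      · simp only [List.nil_append]
        rw [ih (acc ++ [p.1 - c + c + 1]) 0, ih [p.1 - c + c + 1] 0, List.append_assoc]
      · exact ih acc 0

-- main invariant lemma: walking the tail of `lines` from position n with c trailing blanks
lemma pvMain (lines : List String) :
    ∀ (rest : List String) (n : Nat) (c : Int),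
      lines.drop n = rest →
      0 ≤ c → c ≤ (n : Int) →
      (∀ k : Nat, 1 ≤ k → (k : Int) ≤ c → PySem.Str.strip (lines[n - k]?.getD "") = "") →
      (c < (n : Int) → PySem.Str.strip (lines[n - c.toNat - 1]?.getD "") ≠ "") →
      ((PySem.List.enumerate rest (n : Int)).foldl pvStep ([], c)).1 =
        (PySem.List.enumerate rest (n : Int)).filterMap
          (fun p => if pvCond lines p then some (p.1 + 1) else none) := by
  intro rest
  induction rest with
  | nil => intro n c _ _ _ _ _; simp [PySem.List.enumerate_nil]
  | cons l ls ih =>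
    intro n c hdrop hc0 hcn hblank hstop
    have hlen : n < lines.length := by
      have := congrArg List.length hdrop; simp at this; omega
    have hn : lines[n]? = some l := by
      have h0 : (lines.drop n)[0]? = some l := by rw [hdrop]; rfl
      rw [List.getElem?_drop] at h0; simpa using h0
    rw [PySem.List.enumerate_cons]
    simp only [List.foldl_cons, List.filterMap_cons, pvStep]
    by_cases hbl : PySem.Str.strip l = ""
    · -- blank line: counter increments, condition is false
      rw [if_pos hbl]
      have hcond : pvCond lines ((n : Int), l) = false := by
        simp [pvCond, hbl]
      rw [hcond]
      simp only [Bool.false_eq_true, if_false]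
      have : ((n : Int) + 1) = ((n + 1 : Nat) : Int) := by push_cast; ring
      rw [this]
      apply ih (n + 1) (c + 1)
      · have h2 : lines.drop (n + 1) = (lines.drop n).drop 1 := by
          rw [List.drop_drop]
        rw [h2, hdrop]; rfl
      · omega
      · push_cast; omega
      · intro k hk1 hkc
        by_cases hk : k = 1
        · subst hk; simpa [hn] using hbl
        · have : n + 1 - k = n - (k - 1) := by omega
          rw [this]
          exact hblank (k - 1) (by omega) (by push_cast; omega)
      · intro hlt
        have hcn' : c < (n : Int) := by push_cast at hlt; omega
        have : n + 1 - (c + 1).toNat - 1 = n - c.toNat - 1 := by omega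
        rw [this]
        exact hstop hcn'
    · -- non-blank line: emit iff c > 2 iff the three predecessors are blank
      rw [if_neg hbl]
      have hiff : pvCond lines ((n : Int), l) = true ↔ c > 2 := by
        constructor
        · intro h
          simp only [pvCond, List.all_cons, List.all_nil, Bool.and_true,
            Bool.and_eq_true, bne_iff_ne, decide_eq_true_eq, beq_iff_eq] at h
          obtain ⟨⟨-, hn3⟩, h1, h2, h3⟩ := h
          by_contra hle
          have hc2 : c.toNat ≤ 2 := by omega
          have hcltn : c < (n : Int) := by omega
          apply hstop hcltn
          rw [show (n:Int) - 1 = ((n - 1 : Nat) : Int) by omega,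
            PySem.List.pyGet?_natCast] at h1
          rw [show (n:Int) - 2 = ((n - 2 : Nat) : Int) by omega,
            PySem.List.pyGet?_natCast] at h2
          rw [show (n:Int) - 3 = ((n - 3 : Nat) : Int) by omega,
            PySem.List.pyGet?_natCast] at h3
          interval_cases h : c.toNat
          · exact h1
          · rw [show n - 1 - 1 = n - 2 by omega]; exact h2
          · rw [show n - 2 - 1 = n - 3 by omega]; exact h3
        · intro hc2
          have hn3 : 3 ≤ (n : Int) := by omega
          simp only [pvCond, List.all_cons, List.all_nil, Bool.and_true,
            Bool.and_eq_true, bne_iff_ne, decide_eq_true_eq, beq_iff_eq]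
          refine ⟨⟨hbl, hn3⟩, ?_, ?_, ?_⟩
          all_goals
            first
            | (rw [show (n:Int) - 1 = ((n - 1 : Nat) : Int) by omega,
                PySem.List.pyGet?_natCast]
               exact hblank 1 (by omega) (by omega))
            | (rw [show (n:Int) - 2 = ((n - 2 : Nat) : Int) by omega,
                PySem.List.pyGet?_natCast]
               exact hblank 2 (by omega) (by omega))
            | (rw [show (n:Int) - 3 = ((n - 3 : Nat) : Int) by omega,
                PySem.List.pyGet?_natCast]
               exact hblank 3 (by omega) (by omega))
      have hrec : ((PySem.List.enumerate ls ((n : Int) + 1)).foldl pvStep ([], 0)).1 =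
          (PySem.List.enumerate ls ((n : Int) + 1)).filterMap
            (fun p => if pvCond lines p then some (p.1 + 1) else none) := by
        rw [show ((n : Int) + 1) = ((n + 1 : Nat) : Int) by push_cast; ring]
        apply ih (n + 1) 0
        · rw [show lines.drop (n+1) = (lines.drop n).drop 1 by rw [List.drop_drop], hdrop]; rfl
        · omega
        · omega
        · intro k hk1 hk0; exfalso; omega
        · intro _
          simp only [Int.toNat_zero, Nat.sub_zero, Nat.add_sub_cancel]
          simpa [hn] using hbl
      by_cases hc2 : c > 2
      · rw [if_pos hc2, if_pos (hiff.mpr hc2)]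
        rw [foldl_pvStep_acc, hrec]
        simp
      · rw [if_neg hc2]
        have : pvCond lines ((n : Int), l) = false := by
          by_contra h
          exact hc2 (hiff.mp (by simpa using Bool.not_eq_false _ |>.mp h))
        rw [this]
        simpa using hrec

-- ===== VERDICT (by name: the statement is the Claim_ definition above) =====
theorem has_more_than_two_blank_lines_spec : Claim_equal_has_more_than_two_blank_lines := by
  intro lines _
  show has_more_than_two_blank_lines lines = has_more_than_two_blank_lines_alt lines
  unfold has_more_than_two_blank_lines has_more_than_two_blank_lines_alt
  have := pvMain lines lines 0 0 (by simp) (by omega) (by omega)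
    (fun k hk1 hk0 => by exfalso; omega) (by intro h; exfalso; omega)
  simp only [Nat.cast_zero] at this
  rw [show ((PySem.List.enumerate lines).foldl (fun (st : List Int × Int) (p : Int × String) =>
      if PySem.Str.strip p.2 = "" then (st.1, st.2 + 1)
      else (if st.2 > 2 then st.1 ++ [p.1 - st.2 + st.2 + 1] else st.1, 0)) ([], 0))
      = ((PySem.List.enumerate lines (0:Int)).foldl pvStep ([], 0)) from rfl]
  rw [this]
  rfl
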